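-- pv_equiv track=rewrite | github.com/xinghun61/infra | appengine/findit/libs/gtest_name_util.py | RemoveAllPrefixesFromTestName
-- ===== SOURCE A (Python) =====
-- _PRE_TEST_PREFIX = 'PRE_'
--
-- def RemoveAllPrefixesFromTestName(test):
--   """Removes prefixes from test names.
--
--   Args:
--     test (str): A test's name, eg: 'suite1.PRE_test1'.
--
--   Returns:
--     base_test (str): A base test name, eg: 'suite1.test1'.
--   """
--   test_name_start = max(test.find('.'), 0)
--   if test_name_start == 0:
--     return test
--
--   test_suite = test[:test_name_start]
--   test_name = test[test_name_start + 1:]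
--   while test_name.startswith(_PRE_TEST_PREFIX):
--     test_name = test_name[len(_PRE_TEST_PREFIX):]
--   base_test = '%s.%s' % (test_suite, test_name)
--   return base_test
-- ===== SOURCE B (Python) =====
-- def RemoveAllPrefixesFromTestName(test):
--   """Removes prefixes from test names (single index pass, no intermediate slices)."""
--   dot = test.find('.')
--   if dot <= 0:
--     return test
--   j = dot + 1
--   while test.startswith('PRE_', j):
--     j += 4
--   return test[:dot + 1] + test[j:]
-- ===== Notes on version B (the rewrite author's own statement) =====
-- stated objective: simpler
-- what changed: B keeps a single index into the original string and advances it over the leading run of 'PRE_' with startswith(.., j), then does one concatenation, instead of splitting into suite/name and repeatedly re-slicing the name inside the loop.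
import Mathlib
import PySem

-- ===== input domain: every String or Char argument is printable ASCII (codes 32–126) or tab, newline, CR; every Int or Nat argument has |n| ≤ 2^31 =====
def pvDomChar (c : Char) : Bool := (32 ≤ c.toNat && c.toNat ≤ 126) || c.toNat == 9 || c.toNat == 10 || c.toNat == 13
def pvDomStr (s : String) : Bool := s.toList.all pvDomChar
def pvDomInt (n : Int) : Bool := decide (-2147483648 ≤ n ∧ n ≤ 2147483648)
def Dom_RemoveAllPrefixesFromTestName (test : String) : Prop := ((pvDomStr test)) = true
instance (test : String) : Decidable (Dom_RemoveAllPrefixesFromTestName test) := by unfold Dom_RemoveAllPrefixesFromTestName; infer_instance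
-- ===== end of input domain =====

-- B keeps a single index into the original string and advances it over the leading 'PRE_' run,
-- then does one concatenation, instead of splitting into suite/name and re-slicing in the loop.

-- ===== PORT A =====
def pvPRE : List Char := ['P', 'R', 'E', '_']

-- while test_name.startswith('PRE_'): test_name = test_name[len('PRE_'):]
def pvStripPreA (name : List Char) : List Char :=
  if PySem.Chars.startswith name pvPRE = true then
    pvStripPreA (PySem.Chars.slice name (some ((4 : Nat) : Int)) none)
  else name
termination_by name.length
decreasing_by
  simp only [PySem.Chars.slice_eq_listSlice, PySem.List.slice_from_natCast, List.length_drop]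
  have h4 : pvPRE.length ≤ name.length :=
    List.IsPrefix.length_le ((PySem.Chars.startswith_iff _ _).mp (by assumption))
  simp [pvPRE] at h4; omega

def RemoveAllPrefixesFromTestName (test : String) : String :=
  let s := test.toList
  let test_name_start := max (PySem.Chars.find s ['.']) 0
  if test_name_start = 0 then test
  else
    let test_suite := PySem.Chars.slice s none (some test_name_start)
    let test_name := PySem.Chars.slice s (some (test_name_start + 1)) none
    String.mk (test_suite ++ ['.'] ++ pvStripPreA test_name)

-- ===== PORT B =====
-- test.startswith('PRE_', j) for 0 ≤ j: exact as (s.drop j).take 4 = 'PRE_' (j is never negative here)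
def pvAdvance (s : List Char) (j : Nat) : Nat :=
  if (s.drop j).take 4 = pvPRE then pvAdvance s (j + 4) else j
termination_by s.length - j
decreasing_by
  rename_i h
  have : (s.drop j) ≠ [] := by
    intro hnil; rw [hnil] at h; simp [pvPRE] at h
  have : j < s.length := by
    by_contra hge
    exact this (List.drop_eq_nil_of_le (by omega))
  omega

def RemoveAllPrefixesFromTestName_alt (test : String) : String :=
  let s := test.toList
  let dot := PySem.Chars.find s ['.']
  if dot ≤ 0 then test
  else
    let j := pvAdvance s (dot.toNat + 1)
    String.mk (s.take (dot.toNat + 1) ++ s.drop j)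

-- ===== PRECONDITION & SPEC =====
def Spec_RemoveAllPrefixesFromTestName (test : String) (out : String) : Prop := out = RemoveAllPrefixesFromTestName_alt test
instance (test : String) (out : String) : Decidable (Spec_RemoveAllPrefixesFromTestName test out) := by unfold Spec_RemoveAllPrefixesFromTestName; infer_instance

-- ===== CLAIM (what is proved, stated in full; the proofs are below) =====
def Claim_equal_RemoveAllPrefixesFromTestName : Prop := ∀ (test : String), Dom_RemoveAllPrefixesFromTestName test → Spec_RemoveAllPrefixesFromTestName test (RemoveAllPrefixesFromTestName test)

-- ===== LEMMAS AND PROOFS =====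

-- dropping to B's advanced index is exactly A's repeated 'PRE_' stripping of the name
theorem take_four_iff_startswith (l : List Char) :
    l.take 4 = pvPRE ↔ PySem.Chars.startswith l pvPRE = true := by
  rw [PySem.Chars.startswith_iff, List.prefix_iff_eq_take]
  constructor <;> intro h <;> simpa [pvPRE] using h.symm

theorem drop_pvAdvance (s : List Char) (j : Nat) :
    s.drop (pvAdvance s j) = pvStripPreA (s.drop j) := by
  fun_induction pvAdvance s j with
  | case1 j h ih =>
    rw [ih]
    conv_rhs => rw [pvStripPreA]
    rw [if_pos ((take_four_iff_startswith _).mp h)]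
    rw [PySem.Chars.slice_eq_listSlice, PySem.List.slice_from_natCast]
    norm_num [List.drop_drop, Nat.add_comm]
  | case2 j h =>
    conv_rhs => rw [pvStripPreA]
    rw [if_neg]
    intro hsw
    exact h ((take_four_iff_startswith _).mpr hsw)

theorem RemoveAllPrefixesFromTestName_eq (test : String) :
    RemoveAllPrefixesFromTestName test = RemoveAllPrefixesFromTestName_alt test := by
  unfold RemoveAllPrefixesFromTestName RemoveAllPrefixesFromTestName_alt
  dsimp only
  set s := test.toList with hs
  by_cases hle : PySem.Chars.find s ['.'] ≤ 0
  · have hmax : max (PySem.Chars.find s ['.']) 0 = 0 := by omega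
    rw [if_pos hle, hmax]
    simp
  · -- 1 ≤ find: both take the suite/name branch
    have hpos : 0 < PySem.Chars.find s ['.'] := by omega
    have hmax : max (PySem.Chars.find s ['.']) 0 = PySem.Chars.find s ['.'] := by omega
    rw [if_neg hle, hmax, if_neg (by omega)]
    have hpre : ['.'] <+: s.drop (PySem.Chars.find s ['.']).toNat :=
      (PySem.Chars.find_spec (by omega)).1
    set d := (PySem.Chars.find s ['.']).toNat with hd
    have hcast : PySem.Chars.find s ['.'] = (d : Int) := by omega
    congr 1
    have h1 : PySem.Chars.slice s none (some (PySem.Chars.find s ['.'])) = s.take d := by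
      rw [PySem.Chars.slice_eq_listSlice, hcast, PySem.List.slice_to_natCast]
    have h2 : PySem.Chars.slice s (some (PySem.Chars.find s ['.'] + 1)) none
        = s.drop (d + 1) := by
      rw [PySem.Chars.slice_eq_listSlice, hcast]
      have : ((d : Int) + 1) = ((d + 1 : Nat) : Int) := by push_cast; ring
      rw [this, PySem.List.slice_from_natCast]
    rw [h1, h2, ← drop_pvAdvance s (d + 1)]
    have h3 : s.take (d + 1) = s.take d ++ [ '.' ] := by
      obtain ⟨t, ht⟩ := hpre
      rw [List.take_add, ← ht]
      simp
    rw [h3, List.append_assoc]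

-- ===== VERDICT (by name: the statement is the Claim_ definition above) =====
theorem RemoveAllPrefixesFromTestName_spec : Claim_equal_RemoveAllPrefixesFromTestName := by
  intro test _
  exact RemoveAllPrefixesFromTestName_eq test
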